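-- pv_equiv track=rewrite | github.com/ReidenXerx/safe-resource-packer | src/safe_resource_packer/packaging/package_builder.py | _extract_data_relative_path
-- ===== SOURCE A (Python) =====
-- from typing import Dict, List, Optional, Tuple, Any
--
-- def _extract_data_relative_path(file_path: str) -> Optional[str]:
--     """Extract Data-relative path from full file path."""
--     try:
--         # Find 'Data' in the path (case insensitive)
--         path_parts = file_path.replace('\\', '/').split('/')
--         data_index = -1
--
--         for i, part in enumerate(path_parts):
--             if part.lower() == 'data':
--                 data_index = i
--                 break
--
--         if data_index >= 0 and data_index < len(path_parts) - 1:
--             # Return path relative to Data folder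
--             return '/'.join(path_parts[data_index + 1:])
--
--         return None
--
--     except Exception:
--         return None
-- ===== SOURCE B (Python) =====
-- def _extract_data_relative_path(file_path):
--     """Extract Data-relative path by a single character scan (no split/join)."""
--     try:
--         normalized = file_path.replace('\\', '/')
--         seg = ''
--         for j, ch in enumerate(normalized):
--             if ch == '/':
--                 if seg.lower() == 'data':
--                     return normalized[j + 1:]
--                 seg = ''
--             else:
--                 seg += ch
--         return None
--     except Exception:
--         return None
-- ===== Notes on version B (the rewrite author's own statement) =====
-- stated objective: alternative
-- what changed: A normalizes backslashes, splits the path into a list of segments, scans that list with enumerate for the first Data segment and re-joins the tail; B makes a single left-to-right character scan over the normalized string, accumulating the current segment and returning the remaining substring at the slash that closes the first Data segment, with no split, no list of parts and no join.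
import Mathlib
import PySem

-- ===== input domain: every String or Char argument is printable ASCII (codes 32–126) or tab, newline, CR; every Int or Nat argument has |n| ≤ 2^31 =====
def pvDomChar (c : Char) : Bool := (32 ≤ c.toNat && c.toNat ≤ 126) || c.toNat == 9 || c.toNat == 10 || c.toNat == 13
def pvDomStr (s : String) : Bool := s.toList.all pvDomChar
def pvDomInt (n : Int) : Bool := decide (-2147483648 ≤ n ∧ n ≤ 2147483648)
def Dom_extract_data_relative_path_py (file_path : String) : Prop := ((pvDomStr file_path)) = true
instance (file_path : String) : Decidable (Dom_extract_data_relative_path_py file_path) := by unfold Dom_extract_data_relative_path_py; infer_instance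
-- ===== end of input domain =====

-- B replaces A's split/loop/join pipeline with a single left-to-right character scan (alternative decomposition, same result).

-- ===== PORT A =====
-- A's "for i, part in enumerate(path_parts): if part.lower() == 'data': data_index = i; break" loop
def pvFindData (parts : List String) (i : Int) : Int :=
  match parts with
  | [] => -1
  | p :: rest => if PySem.Str.lower p == "data" then i else pvFindData rest (i + 1)

def extract_data_relative_path_py (file_path : String) : Option String :=
  let path_parts := (PySem.Str.split? (PySem.Str.replace file_path "\\" "/") "/").getD []
  let data_index := pvFindData path_parts 0
  if data_index ≥ 0 ∧ data_index < (path_parts.length : Int) - 1 then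
    some (PySem.Str.join "/" (PySem.List.slice path_parts (some (data_index + 1)) none))
  else
    none

-- ===== PORT B =====
-- Source B's "for j, ch in enumerate(normalized)" scan; seg is the current segment so far
def pvScanB (normalized : List Char) : List (Int × Char) → List Char → Option (List Char)
  | [], _ => none
  | (j, ch) :: rest, seg =>
      if ch == '/' then
        if PySem.Chars.lower seg == "data".toList then
          some (PySem.List.slice normalized (some (j + 1)) none)   -- normalized[j+1:]
        else pvScanB normalized rest []
      else pvScanB normalized rest (seg ++ [ch])

def extract_data_relative_path_py_alt (file_path : String) : Option String :=
  let normalized := PySem.Str.replace file_path "\\" "/"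
  (pvScanB normalized.toList (PySem.List.enumerate normalized.toList 0) []).map String.ofList

-- ===== PRECONDITION & SPEC =====
def Spec_extract_data_relative_path_py (file_path : String) (out : Option String) : Prop := out = extract_data_relative_path_py_alt file_path
instance (file_path : String) (out : Option String) : Decidable (Spec_extract_data_relative_path_py file_path out) := by unfold Spec_extract_data_relative_path_py; infer_instance

-- ===== CLAIM (what is proved, stated in full; the proofs are below) =====
def Claim_equal_extract_data_relative_path_py : Prop := ∀ (file_path : String), Dom_extract_data_relative_path_py file_path → Spec_extract_data_relative_path_py file_path (extract_data_relative_path_py file_path)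

-- ===== LEMMAS AND PROOFS =====

-- proof-side structural split on '/'
def mySplit : List Char → List (List Char)
  | [] => [[]]
  | c :: t => if c = '/' then [] :: mySplit t else (mySplit t).modifyHead (c :: ·)

-- common reference recursion: first 'data' segment that is followed by at least one more segment
def recA' : List (List Char) → Option (List Char)
  | [] => none
  | s :: rest =>
      match rest with
      | [] => none
      | _ :: _ =>
          if PySem.Chars.lower s = "data".toList then some (PySem.Chars.join ['/'] rest)
          else recA' rest

-- A's post-split computation, factored out (definitionally A's body after the split)
def ApostStr (parts : List String) : Option String :=
  let di := pvFindData parts 0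
  if di ≥ 0 ∧ di < (parts.length : Int) - 1 then
    some (PySem.Str.join "/" (PySem.List.slice parts (some (di + 1)) none))
  else none

-- recA' transported to List String
def recAStr : List String → Option String
  | [] => none
  | s :: rest =>
      match rest with
      | [] => none
      | _ :: _ =>
          if PySem.Str.lower s == "data" then some (PySem.Str.join "/" rest)
          else recAStr rest

theorem mySplit_ne_nil (l : List Char) : mySplit l ≠ [] := by
  induction l with
  | nil => simp [mySplit]
  | cons c t ih =>
    simp only [mySplit]
    split_ifs
    · simp
    · cases h : mySplit t with
      | nil => exact absurd h ih
      | cons a b => simp [List.modifyHead]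

theorem join_mySplit (l : List Char) : PySem.Chars.join ['/'] (mySplit l) = l := by
  induction l with
  | nil => simp [mySplit, PySem.Chars.join, List.intercalate]
  | cons c t ih =>
    simp only [mySplit]
    split_ifs with hc
    · subst hc
      cases h : mySplit t with
      | nil => exact absurd h (mySplit_ne_nil t)
      | cons a b =>
        rw [PySem.Chars.join_cons_cons, ← ih, h]
        simp
    · cases h : mySplit t with
      | nil => exact absurd h (mySplit_ne_nil t)
      | cons a b =>
        rw [← ih, h]
        cases b with
        | nil => simp [List.modifyHead, PySem.Chars.join, List.intercalate]
        | cons x y =>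
          simp only [List.modifyHead]
          rw [PySem.Chars.join_cons_cons, PySem.Chars.join_cons_cons]
          simp

theorem splitOn_go_eq (l : List Char) : ∀ (fuel : Nat) (cur : List Char) (acc : List (List Char)), l.length < fuel →
    PySem.Chars.splitOn.go ['/'] fuel l cur acc
      = acc.reverse ++ (mySplit l).modifyHead (cur.reverse ++ ·) := by
  induction l with
  | nil =>
    intro fuel cur acc h
    cases fuel with
    | zero => omega
    | succ n => simp [PySem.Chars.splitOn.go, mySplit]
  | cons c rest ih =>
    intro fuel cur acc h
    cases fuel with
    | zero => omega
    | succ n =>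
      rw [PySem.Chars.splitOn.go]
      by_cases hc : c = '/'
      · subst hc
        simp only [List.isPrefixOf, beq_self_eq_true, Bool.and_self, if_true,
          List.drop_succ_cons, List.drop_zero, List.length_singleton]
        rw [ih n [] (cur.reverse :: acc) (by simp at h ⊢; omega)]
        simp [mySplit, List.modifyHead]
        cases mySplit rest <;> rfl
      · have hcc : ('/' == c) = false := by simp [Ne.symm hc]
        simp only [List.isPrefixOf, hcc, Bool.false_and, Bool.false_eq_true, if_false]
        rw [ih n (c :: cur) acc (by simp at h ⊢; omega)]
        have hmn := mySplit_ne_nil rest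
        cases hms : mySplit rest with
        | nil => exact absurd hms hmn
        | cons a b =>
          simp [mySplit, hc, hms, List.modifyHead]

theorem splitOn_eq_mySplit (l : List Char) : PySem.Chars.splitOn l ['/'] = mySplit l := by
  rw [PySem.Chars.splitOn, splitOn_go_eq l (l.length + 1) [] [] (by omega)]
  cases h : mySplit l <;> simp [List.modifyHead]

theorem scan_eq (L : List Char) : ∀ (cs : List Char) (j : Nat) (seg : List Char),
    L.drop j = cs →
    pvScanB L (PySem.List.enumerate cs (j : Int)) seg
      = recA' ((mySplit cs).modifyHead (seg ++ ·)) := by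
  intro cs
  induction cs with
  | nil =>
    intro j seg hd
    simp [PySem.List.enumerate_nil, pvScanB, mySplit, List.modifyHead, recA']
  | cons c rest ih =>
    intro j seg hd
    have hd' : L.drop (j + 1) = rest := by
      have : L.drop (j + 1) = (L.drop j).drop 1 := by rw [List.drop_drop]
      rw [this, hd]; rfl
    have hj1 : ((j : Int) + 1) = ((j + 1 : Nat) : Int) := by push_cast; ring
    rw [PySem.List.enumerate_cons]
    cases hms : mySplit rest with
    | nil => exact absurd hms (mySplit_ne_nil rest)
    | cons a b =>
      by_cases hc : c = '/'
      · subst hc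
        have e1 : (mySplit ('/' :: rest)).modifyHead (seg ++ ·) = seg :: a :: b := by
          simp [mySplit, hms, List.modifyHead]
        rw [e1]
        simp only [pvScanB, beq_self_eq_true, if_true]
        by_cases hseg : PySem.Chars.lower seg = "data".toList
        · rw [if_pos (by simpa using hseg), hj1, PySem.List.slice_from_natCast, hd']
          simp only [recA', if_pos hseg]
          rw [← hms, join_mySplit]
        · rw [if_neg (by simpa using hseg), hj1, ih (j + 1) [] hd']
          simp only [recA', if_neg hseg]
          simp only [hms, List.modifyHead]
          cases b <;> simp [recA']
      · have hcc : (c == '/') = false := by simp [hc]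
        simp only [pvScanB, hcc, Bool.false_eq_true, if_false]
        rw [hj1, ih (j + 1) (seg ++ [c]) hd']
        simp [mySplit, hms, List.modifyHead, hc]

theorem recAStr_cons (p q : String) (qs : List String) (hp : ¬ (PySem.Str.lower p == "data") = true) :
    recAStr (p :: q :: qs) = recAStr (q :: qs) := by
  simp [recAStr, hp]

theorem pvFindData_ge (parts : List String) : ∀ (i : Int),
    pvFindData parts i = -1 ∨ i ≤ pvFindData parts i := by
  induction parts with
  | nil => intro i; left; rfl
  | cons p rest ih =>
    intro i
    by_cases hp : (PySem.Str.lower p == "data") = true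
    · right; simp [pvFindData, hp]
    · simp only [pvFindData, hp, Bool.false_eq_true, if_false]
      rcases ih (i + 1) with h | h
      · left; exact h
      · right; omega

theorem pvFindData_shift (parts : List String) : ∀ (i : Int),
    pvFindData parts i = if pvFindData parts 0 = -1 then -1 else pvFindData parts 0 + i := by
  induction parts with
  | nil => intro i; simp [pvFindData]
  | cons p rest ih =>
    intro i
    by_cases hp : (PySem.Str.lower p == "data") = true
    · simp [pvFindData, hp]
    · simp only [pvFindData, hp, Bool.false_eq_true, if_false]
      rw [ih (i + 1), ih (0 + 1)]
      by_cases hd : pvFindData rest 0 = -1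
      · simp [hd]
      · rcases pvFindData_ge rest 0 with h0 | h0
        · exact absurd h0 hd
        · simp only [hd, if_false]
          rw [if_neg (by omega)]
          ring

theorem pvFindData_cases (parts : List String) :
    pvFindData parts 0 = -1 ∨ (0 ≤ pvFindData parts 0 ∧ pvFindData parts 0 < (parts.length : Int)) := by
  induction parts with
  | nil => left; rfl
  | cons p rest ih =>
    by_cases hp : (PySem.Str.lower p == "data") = true
    · right; simp [pvFindData, hp]
    · simp only [pvFindData, hp, Bool.false_eq_true, if_false]
      rw [pvFindData_shift rest (0 + 1)]
      rcases ih with h | h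
      · left; rw [if_pos h]
      · right
        rw [if_neg (by omega)]
        constructor
        · omega
        · simp only [List.length_cons]; push_cast; omega

theorem apost_eq_recAStr (parts : List String) : ApostStr parts = recAStr parts := by
  induction parts with
  | nil => simp [ApostStr, pvFindData, recAStr]
  | cons p rest ih =>
    by_cases hp : (PySem.Str.lower p == "data") = true
    · cases rest with
      | nil => simp [ApostStr, pvFindData, hp, recAStr]
      | cons q qs =>
        simp only [ApostStr, pvFindData, hp, if_true, recAStr]
        rw [if_pos (by constructor <;> [positivity; (simp only [List.length_cons]; push_cast; omega)])]
        norm_num [PySem.List.slice_from_one]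
    · have hstep : pvFindData (p :: rest) 0 = pvFindData rest 1 := by
        simp [pvFindData, hp]
      rcases pvFindData_cases rest with hd | hd
      · have : pvFindData (p :: rest) 0 = -1 := by
          rw [hstep, pvFindData_shift rest 1, if_pos hd]
        simp only [ApostStr, this]
        rw [if_neg (by omega)]
        cases rest with
        | nil => simp [recAStr]
        | cons q qs =>
          rw [recAStr_cons p q qs hp, ← ih]
          simp only [ApostStr, hd]
          rw [if_neg (by omega)]
      · obtain ⟨n, hn⟩ : ∃ n : Nat, pvFindData rest 0 = (n : Int) :=
          ⟨(pvFindData rest 0).toNat, by omega⟩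
        have hlen : n < rest.length := by
          have := hd.2; omega
        have hdi : pvFindData (p :: rest) 0 = (n : Int) + 1 := by
          rw [hstep, pvFindData_shift rest 1, if_neg (by omega), hn]
        cases rest with
        | nil => simp at hlen
        | cons q qs =>
          rw [recAStr_cons p q qs hp, ← ih]
          simp only [ApostStr, hdi, hn]
          have hcout : ((n : Int) + 1 ≥ 0 ∧ (n : Int) + 1 < (((p :: q :: qs).length : Nat) : Int) - 1) ↔
              ((n : Int) ≥ 0 ∧ (n : Int) < (((q :: qs).length : Nat) : Int) - 1) := by
            simp only [List.length_cons]; push_cast; omega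
          by_cases hcond : (n : Int) ≥ 0 ∧ (n : Int) < (((q :: qs).length : Nat) : Int) - 1
          · rw [if_pos (hcout.mpr hcond), if_pos hcond]
            congr 1
            congr 1
            rw [show ((n : Int) + 1 + 1) = ((n + 2 : Nat) : Int) by push_cast; ring,
              show ((n : Int) + 1) = ((n + 1 : Nat) : Int) by push_cast; ring,
              PySem.List.slice_from_natCast, PySem.List.slice_from_natCast]
            simp
          · rw [if_neg (fun h => hcond (hcout.mp h)), if_neg hcond]

theorem lower_ofList_beq (s : List Char) :
    (PySem.Str.lower (String.ofList s) == "data") = true ↔ PySem.Chars.lower s = "data".toList := by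
  constructor
  · intro h
    have h2 : PySem.Str.lower (String.ofList s) = "data" := beq_iff_eq.mp h
    have h3 := congrArg String.toList h2
    rw [PySem.Str.toList_lower, String.toList_ofList] at h3
    exact h3
  · intro h
    have : PySem.Str.lower (String.ofList s) = "data" := by
      apply String.toList_injective
      rw [PySem.Str.toList_lower, String.toList_ofList, h]
    exact beq_iff_eq.mpr this

theorem join_map_ofList (l : List (List Char)) :
    PySem.Str.join "/" (l.map String.ofList) = String.ofList (PySem.Chars.join ['/'] l) := by
  simp [PySem.Str.join, List.map_map, Function.comp_def]

theorem recAStr_map (ps : List (List Char)) :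
    recAStr (ps.map String.ofList) = (recA' ps).map String.ofList := by
  induction ps with
  | nil => rfl
  | cons s rest ih =>
    cases rest with
    | nil => rfl
    | cons t ts =>
      simp only [List.map_cons] at *
      by_cases hs : PySem.Chars.lower s = "data".toList
      · have hb := (lower_ofList_beq s).mpr hs
        show (if (PySem.Str.lower (String.ofList s) == "data") = true then
            some (PySem.Str.join "/" (String.ofList t :: List.map String.ofList ts))
          else recAStr (String.ofList t :: List.map String.ofList ts)) = _
        rw [if_pos hb]
        simp only [recA', if_pos hs, Option.map_some]
        rw [← List.map_cons, join_map_ofList]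
      · have hb : ¬ (PySem.Str.lower (String.ofList s) == "data") = true :=
          fun h => hs ((lower_ofList_beq s).mp h)
        show (if (PySem.Str.lower (String.ofList s) == "data") = true then
            some (PySem.Str.join "/" (String.ofList t :: List.map String.ofList ts))
          else recAStr (String.ofList t :: List.map String.ofList ts)) = _
        rw [if_neg hb]
        simp only [recA', if_neg hs]
        exact ih

theorem ports_agree (fp : String) : extract_data_relative_path_py fp = extract_data_relative_path_py_alt fp := by
  have hA : extract_data_relative_path_py fp
      = ApostStr ((PySem.Str.split? (PySem.Str.replace fp "\\" "/") "/").getD []) := rfl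
  have hsplit : (PySem.Str.split? (PySem.Str.replace fp "\\" "/") "/").getD []
      = (mySplit (PySem.Str.replace fp "\\" "/").toList).map String.ofList := by
    simp [PySem.Str.split?, PySem.Chars.split?, splitOn_eq_mySplit]
  rw [hA, hsplit, apost_eq_recAStr, recAStr_map]
  have hscan := scan_eq (PySem.Str.replace fp "\\" "/").toList
    (PySem.Str.replace fp "\\" "/").toList 0 [] (by simp)
  have hmod : ((mySplit (PySem.Str.replace fp "\\" "/").toList).modifyHead ([] ++ ·))
      = mySplit (PySem.Str.replace fp "\\" "/").toList := by
    cases mySplit (PySem.Str.replace fp "\\" "/").toList <;> simp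
  rw [hmod] at hscan
  show _ = (pvScanB _ (PySem.List.enumerate _ (0 : Int)) []).map String.ofList
  rw [show (0 : Int) = ((0 : Nat) : Int) from rfl, hscan]

-- ===== VERDICT (by name: the statement is the Claim_ definition above) =====
theorem extract_data_relative_path_py_spec : Claim_equal_extract_data_relative_path_py := by
  intro fp _
  exact ports_agree fp
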